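-- pv_equiv track=rewrite | github.com/mmswflow-upb/FLC-Lab-Work | Labs/Lab 5/ex1.py | dfa_ex1
-- ===== SOURCE A (Python) =====
-- def dfa_ex1(word):
--
--     transitions = {
--         "A": {"1": "B"},
--         "B": {"1": "B"}
--     }
--     state = "A"
--
--     for char in word:
--         if char in transitions[state]:
--             state = transitions[state][char]
--         else:
--             return False
--     return state == "B"
-- ===== SOURCE B (Python) =====
-- def dfa_ex1(word):
--     # set-based check: the distinct characters of word must be exactly {"1"}
--     chars = set(word)
--     return word != "" and chars == {"1"}
-- ===== Notes on version B (the rewrite author's own statement) =====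
-- stated objective: simpler
-- what changed: Replaces the DFA transition-table simulation (per-character state updates with early return) by building the set of distinct characters once and comparing it to {"1"} with an explicit nonempty guard.
import Mathlib
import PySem

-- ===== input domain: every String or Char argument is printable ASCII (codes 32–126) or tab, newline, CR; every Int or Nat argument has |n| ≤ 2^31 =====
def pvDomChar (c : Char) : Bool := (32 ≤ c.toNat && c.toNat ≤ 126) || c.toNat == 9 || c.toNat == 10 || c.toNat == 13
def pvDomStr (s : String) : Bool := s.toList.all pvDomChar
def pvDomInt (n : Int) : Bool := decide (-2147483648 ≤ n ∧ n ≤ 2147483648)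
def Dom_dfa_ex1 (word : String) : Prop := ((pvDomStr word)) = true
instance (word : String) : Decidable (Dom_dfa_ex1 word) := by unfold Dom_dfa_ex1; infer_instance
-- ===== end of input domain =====

-- B replaces A's DFA transition-table simulation by a distinct-character-set comparison (objective: simpler).

-- ===== PORT A =====
-- the transitions dict literal of A
def dfa_ex1_transitions : PySem.Dict String (PySem.Dict String String) :=
  ⟨[("A", ⟨[("1", "B")]⟩), ("B", ⟨[("1", "B")]⟩)]⟩

-- the for-loop of A: per-character transition with early 'return False'
def dfa_ex1_loop (state : String) (cs : List Char) : Bool :=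
  match cs with
  | [] => state == "B"                                   -- 'return state == "B"'
  | c :: rest =>
    -- transitions[state]: 'state' is always a key here, so getD is exact (no KeyError reachable)
    let inner := PySem.Dict.getD dfa_ex1_transitions state ⟨[]⟩
    if PySem.Dict.contains inner (String.ofList [c]) then    -- 'if char in transitions[state]'
      -- transitions[state][char]: the key is present on this branch, so getD is exact
      dfa_ex1_loop (PySem.Dict.getD inner (String.ofList [c]) "") rest
    else false                                           -- 'return False'

def dfa_ex1 (word : String) : Bool := dfa_ex1_loop "A" word.toList

-- ===== PORT B =====
def dfa_ex1_alt (word : String) : Bool :=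
  -- chars = set(word);  return word != "" and chars == {"1"}
  (word != "") && PySem.Set.equal (PySem.Set.ofList word.toList) ['1']

-- ===== PRECONDITION & SPEC =====
def Spec_dfa_ex1 (word : String) (out : Bool) : Prop := out = dfa_ex1_alt word
instance (word : String) (out : Bool) : Decidable (Spec_dfa_ex1 word out) := by unfold Spec_dfa_ex1; infer_instance

-- ===== CLAIM (what is proved, stated in full; the proofs are below) =====
def Claim_equal_dfa_ex1 : Prop := ∀ (word : String), Dom_dfa_ex1 word → Spec_dfa_ex1 word (dfa_ex1 word)

-- ===== LEMMAS AND PROOFS =====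

-- In either reachable state ("A" or "B"), the loop returns true iff every remaining
-- character is '1' and (if nothing remains) we are already in state "B".
theorem dfa_ex1_loop_char (cs : List Char) :
    ∀ state, (state = "A" ∨ state = "B") →
      dfa_ex1_loop state cs =
        (cs.all (· == '1') && (if cs.isEmpty then state == "B" else true)) := by
  induction cs with
  | nil => intro state _; simp [dfa_ex1_loop]
  | cons c rest ih =>
    intro state hst
    have hinner : PySem.Dict.getD dfa_ex1_transitions state ⟨[]⟩ = ⟨[("1", "B")]⟩ := by
      rcases hst with h | h <;> subst h <;> decide
    have hcontains : PySem.Dict.contains (⟨[("1", "B")]⟩ : PySem.Dict String String)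
        (String.ofList [c]) = (c == '1') := by
      have h1 : ("1" = String.ofList [c]) ↔ c = '1' := by simp [String.ext_iff, eq_comm]
      simp [PySem.Dict.contains, h1]
    by_cases hc : c = '1'
    · subst hc
      have hget : PySem.Dict.getD (⟨[("1", "B")]⟩ : PySem.Dict String String) "1" "" = "B" := rfl
      simp [dfa_ex1_loop, hinner, hcontains, hget, ih "B" (Or.inr rfl)]
    · have hcf : (c == '1') = false := by simpa using hc
      simp [dfa_ex1_loop, hinner, hcontains, hcf]

-- B's set comparison characterised: set(word) == {'1'} iff word is nonempty and all-'1'.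
theorem set_equal_char (cs : List Char) :
    PySem.Set.equal (PySem.Set.ofList cs) ['1'] =
      (!cs.isEmpty && cs.all (· == '1')) := by
  by_cases h : cs ≠ [] ∧ ∀ x ∈ cs, x = '1'
  · obtain ⟨hne, hall⟩ := h
    have : PySem.Set.equal (PySem.Set.ofList cs) ['1'] = true := by
      rw [PySem.Set.equal_iff]
      intro x
      simp only [PySem.Set.mem_ofList, List.mem_singleton]
      constructor
      · exact fun hx => hall x hx
      · rintro rfl
        rcases cs with _ | ⟨c, rest⟩
        · exact absurd rfl hne
        · have := hall c (by simp)
          simp [this]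
    rw [this]
    symm
    simp only [Bool.and_eq_true, Bool.not_eq_true', List.isEmpty_eq_false_iff, List.all_eq_true]
    exact ⟨by simpa using hne, fun x hx => by simpa using hall x hx⟩
  · have hfalse : PySem.Set.equal (PySem.Set.ofList cs) ['1'] = false := by
      rw [Bool.eq_false_iff]
      intro hcontra
      rw [PySem.Set.equal_iff] at hcontra
      apply h
      constructor
      · intro hnil
        subst hnil
        have := (hcontra '1').2 (by simp)
        simp at this
      · intro x hx
        have := (hcontra x).1 (by simpa [PySem.Set.mem_ofList] using hx)
        simpa using this
    rw [hfalse]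
    symm
    rw [Bool.eq_false_iff]
    intro hcontra
    simp only [Bool.and_eq_true, Bool.not_eq_true', List.isEmpty_eq_false_iff, List.all_eq_true] at hcontra
    exact h ⟨hcontra.1, fun x hx => by simpa using hcontra.2 x hx⟩

-- ===== VERDICT (by name: the statement is the Claim_ definition above) =====
theorem dfa_ex1_spec : Claim_equal_dfa_ex1 := by
  intro word _
  unfold Spec_dfa_ex1 dfa_ex1 dfa_ex1_alt
  rw [dfa_ex1_loop_char word.toList "A" (Or.inl rfl), set_equal_char]
  have hne : (word != "") = !word.toList.isEmpty := by
    simp only [bne]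
    congr 1
    rw [Bool.eq_iff_iff, beq_iff_eq, List.isEmpty_iff, String.ext_iff]
    simp
  rw [hne]
  rcases h : word.toList with _ | ⟨c, rest⟩ <;> simp
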